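-- pv_equiv track=rewrite | github.com/HolubVisionAI/data_collector | src/post_process/download_with_aria2.py | clean_urls
-- ===== SOURCE A (Python) =====
-- def clean_urls(urls):
--     clean = []
--     for u in urls:
--         if isinstance(u, str):
--             u = u.strip()
--             if u.startswith("http"):
--                 clean.append(u)
--     return list(dict.fromkeys(clean))  # de-dup preserve order
-- ===== SOURCE B (Python) =====
-- def clean_urls(urls):
--     # worklist algorithm: strip once, then repeatedly take the first pending
--     # value; if it is an http URL, emit it and delete all its later duplicates
--     # from the pending list (dedup by removal ahead, no set/dict needed)
--     pending = [u.strip() for u in urls if isinstance(u, str)]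
--     out = []
--     while pending:
--         v = pending.pop(0)
--         if v.startswith("http"):
--             out.append(v)
--             pending = [w for w in pending if w != v]
--     return out
-- ===== Notes on version B (the rewrite author's own statement) =====
-- stated objective: alternative
-- what changed: Replaces filter-then-dict.fromkeys with a worklist algorithm: take the first pending stripped value, emit it if it starts with 'http', and delete all its later duplicates from the pending list, so no set/dict is ever built.
import Mathlib
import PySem

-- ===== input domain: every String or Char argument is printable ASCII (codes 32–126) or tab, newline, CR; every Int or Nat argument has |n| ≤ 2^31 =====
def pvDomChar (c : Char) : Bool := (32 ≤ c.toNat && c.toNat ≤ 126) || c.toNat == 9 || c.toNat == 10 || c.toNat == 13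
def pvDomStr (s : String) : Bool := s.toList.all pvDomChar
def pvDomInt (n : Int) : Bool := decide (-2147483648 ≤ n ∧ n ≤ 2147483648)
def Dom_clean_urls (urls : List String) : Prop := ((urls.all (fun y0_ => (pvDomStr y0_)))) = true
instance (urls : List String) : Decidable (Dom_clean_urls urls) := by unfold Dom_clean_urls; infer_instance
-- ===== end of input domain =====

-- B replaces filter + dict.fromkeys with a worklist that deletes later duplicates ahead (alternative decomposition, no set/dict).

-- ===== PORT A =====
-- builds 'clean' (strip, keep those starting with "http"), then list(dict.fromkeys(clean))
def clean_urls (urls : List String) : List String :=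
  let clean := urls.foldl (fun acc u =>
    let u := PySem.Str.strip u
    if PySem.Str.startswith u "http" then acc ++ [u] else acc) []
  PySem.List.dedup clean

-- ===== PORT B =====
-- B's while loop: pop the first pending value; if it is an http URL, emit it and
-- filter all equal values out of the remaining pending list
def cleanUrlsGo (pending : List String) : List String :=
  match pending with
  | [] => []
  | v :: rest =>
    if PySem.Str.startswith v "http" then
      v :: cleanUrlsGo (rest.filter (fun w => w ≠ v))
    else
      cleanUrlsGo rest
termination_by pending.length
decreasing_by
  · simp only [List.length_unattach]
    exact Nat.lt_succ_of_le (le_trans (List.length_filter_le _ _) (by simp))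
  · simp

def clean_urls_alt (urls : List String) : List String :=
  cleanUrlsGo (urls.map PySem.Str.strip)

-- ===== PRECONDITION & SPEC =====
def Spec_clean_urls (urls : List String) (out : List String) : Prop := out = clean_urls_alt urls
instance (urls : List String) (out : List String) : Decidable (Spec_clean_urls urls out) := by unfold Spec_clean_urls; infer_instance

-- ===== CLAIM (what is proved, stated in full; the proofs are below) =====
def Claim_equal_clean_urls : Prop := ∀ (urls : List String), Dom_clean_urls urls → Spec_clean_urls urls (clean_urls urls)

-- ===== LEMMAS AND PROOFS =====

-- clean unfolding equations for cleanUrlsGo (its equation lemma goes through List.attach)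
theorem cleanUrlsGo_nil : cleanUrlsGo [] = [] := by rw [cleanUrlsGo]

theorem cleanUrlsGo_cons (v : String) (rest : List String) :
    cleanUrlsGo (v :: rest) =
      if PySem.Str.startswith v "http" then
        v :: cleanUrlsGo (rest.filter (fun w => w ≠ v))
      else cleanUrlsGo rest := by
  rw [cleanUrlsGo]

-- adding an element already in the set is a no-op, so filtering it out of the rest changes nothing
theorem foldl_add_filter_ne (m : List String) : ∀ (s : PySem.Set String) (v : String), v ∈ s →
    m.foldl PySem.Set.add s = (m.filter (fun w => w ≠ v)).foldl PySem.Set.add s := by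
  induction m with
  | nil => intro s v _; rfl
  | cons x m ih =>
    intro s v hv
    by_cases hx : x = v
    · subst hx
      have : PySem.Set.add s x = s := by simp [PySem.Set.add, PySem.Set.contains, hv]
      simp [this, ih s x hv]
    · have hmem : v ∈ PySem.Set.add s x := by
        simp [PySem.Set.add]; split <;> simp [hv]
      simp [hx, ih _ v hmem]

-- folding Set.add over a list not containing v, starting from v :: s, keeps v in front
theorem foldl_add_cons_notmem (m : List String) : ∀ (s : List String) (v : String), v ∉ m →
    m.foldl PySem.Set.add (v :: s) = v :: m.foldl PySem.Set.add s := by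
  induction m with
  | nil => intro s v _; rfl
  | cons x m ih =>
    intro s v hv
    have hxv : x ≠ v := fun h => hv (by simp [h])
    have hstep : PySem.Set.add (v :: s) x = v :: PySem.Set.add s x := by
      by_cases hx : x ∈ s
      · simp [PySem.Set.add, PySem.Set.contains, hx, hxv]
      · simp [PySem.Set.add, PySem.Set.contains, hx, hxv]
    simp only [List.foldl_cons, hstep]
    exact ih _ v (fun h => hv (by simp [h]))

-- dict.fromkeys keeps the head and removes its later duplicates
theorem dedup_cons (v : String) (m : List String) :
    PySem.List.dedup (v :: m) = v :: PySem.List.dedup (m.filter (fun w => w ≠ v)) := by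
  rw [PySem.List.dedup_eq_ofList, PySem.List.dedup_eq_ofList, PySem.Set.ofList_eq_foldl,
    PySem.Set.ofList_eq_foldl]
  simp only [List.foldl_cons]
  have h0 : PySem.Set.add ([] : List String) v = [v] := rfl
  rw [h0, foldl_add_filter_ne m [v] v (by simp),
    foldl_add_cons_notmem _ [] v (by simp)]

-- B's worklist computes dict.fromkeys of the http-filtered list
theorem cleanUrlsGo_eq_dedup (n : Nat) : ∀ (l : List String), l.length ≤ n →
    cleanUrlsGo l = PySem.List.dedup (l.filter (fun v => PySem.Str.startswith v "http")) := by
  induction n with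
  | zero =>
    intro l hl
    have : l = [] := List.eq_nil_of_length_eq_zero (Nat.le_zero.mp hl)
    subst this
    simp [cleanUrlsGo_nil]
  | succ n ih =>
    intro l hl
    match l with
    | [] => simp [cleanUrlsGo_nil]
    | v :: rest =>
      rw [cleanUrlsGo_cons, List.filter_cons]
      by_cases h : PySem.Str.startswith v "http" = true
      · simp only [h, if_true]
        have hlen : (rest.filter (fun w => w ≠ v)).length ≤ n :=
          le_trans (List.length_filter_le _ _) (Nat.le_of_succ_le_succ hl)
        rw [ih _ hlen, dedup_cons]
        congr 2
        rw [List.filter_filter, List.filter_filter]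
        apply List.filter_congr
        intro x _
        simp [Bool.and_comm]
      · simp only [h, if_false, Bool.false_eq_true]
        exact ih rest (Nat.le_of_succ_le_succ hl)

-- ===== VERDICT (by name: the statement is the Claim_ definition above) =====
theorem clean_urls_spec : Claim_equal_clean_urls := by
  intro urls _
  show clean_urls urls = clean_urls_alt urls
  simp only [clean_urls, clean_urls_alt]
  rw [cleanUrlsGo_eq_dedup (urls.map PySem.Str.strip).length _ le_rfl,
    PySem.List.foldl_append_if (p := fun u => PySem.Str.startswith (PySem.Str.strip u) "http")
      (f := PySem.Str.strip)]
  simp [List.filter_map, Function.comp_def]
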